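-- pv_equiv track=rewrite | github.com/Sulliwen/Master | Projet_CB/src/modeles/M3.py | pre_treatment
-- ===== SOURCE A (Python) =====
-- def pre_treatment(n, A, k):
--     # création du distancier booleen
--     M_dist = [[False for i in range(n)] for j in range(n)]
--     for i in range(1,n+1):
--         for j in range(1,n+1):
--             if (min(abs(i-j), n - abs(i-j))) <= k:
--                 M_dist[i-1][j-1] = True
--
--     # creation de la matrice booleenne des arretes
--     M_edges = [[False for i in range(n)] for j in range(n)]
--     for a in A:
--         s1 = a[0]-1
--         s2 = a[1]-1
--         M_edges[s1][s2] = True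
--         M_edges[s2][s1] = True
--
--     return M_edges, M_dist
-- ===== SOURCE B (Python) =====
-- def pre_treatment(n, A, k):
--     # M_dist is circulant: compute row 0's band pattern once; each row is a rotation of it
--     pattern = [min(d, n - d) <= k for d in range(n)]
--     M_dist = [pattern[n - i:] + pattern[:n - i] for i in range(n)]
--
--     # M_edges: expand each edge into its two directed index pairs, then one write per arc
--     arcs = [p for (x, y) in A for p in ((x - 1, y - 1), (y - 1, x - 1))]
--     M_edges = [[False] * n for _ in range(n)]
--     for (s, t) in arcs:
--         M_edges[s][t] = True
--     return M_edges, M_dist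
-- ===== Notes on version B (the rewrite author's own statement) =====
-- stated objective: simpler
-- what changed: M_dist is circulant, so B computes the row-0 band pattern once and builds every row as a slice rotation of it instead of evaluating the min/abs predicate in an n x n double loop; M_edges is filled by first expanding each edge into its two directed index pairs and then doing one write per arc, instead of A's per-edge double write.
import Mathlib
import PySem

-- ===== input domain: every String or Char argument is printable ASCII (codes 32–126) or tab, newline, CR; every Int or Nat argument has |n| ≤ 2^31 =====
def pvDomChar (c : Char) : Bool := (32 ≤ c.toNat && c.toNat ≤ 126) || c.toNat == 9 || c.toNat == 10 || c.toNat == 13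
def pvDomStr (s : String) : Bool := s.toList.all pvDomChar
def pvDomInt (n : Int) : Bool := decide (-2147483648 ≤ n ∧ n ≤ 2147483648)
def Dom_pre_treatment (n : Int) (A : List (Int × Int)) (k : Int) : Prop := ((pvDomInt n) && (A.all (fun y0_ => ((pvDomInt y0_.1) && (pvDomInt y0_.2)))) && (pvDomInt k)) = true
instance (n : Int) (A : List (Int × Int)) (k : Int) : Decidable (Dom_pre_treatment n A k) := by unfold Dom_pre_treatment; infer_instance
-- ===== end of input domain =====

-- B builds M_dist's row-0 band pattern once and rotates it per row (circulant matrix)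
-- instead of A's n×n double loop, and fills M_edges with one write per directed arc
-- over the flattened arc list instead of A's two writes per edge; objective: simpler.

-- ===== PORT A =====
def pre_treatment (n : Int) (A : List (Int × Int)) (k : Int) : List (List Bool) × List (List Bool) :=
  let M_dist0 : List (List Bool) :=
    (PySem.List.pyRange 0 n 1).map (fun _ => (PySem.List.pyRange 0 n 1).map (fun _ => false))
  let M_dist := (PySem.List.pyRange 1 (n+1) 1).foldl (fun M i =>
    (PySem.List.pyRange 1 (n+1) 1).foldl (fun M j =>
      if min |i - j| (n - |i - j|) ≤ k then
        PySem.List.pySetD M (i-1) (PySem.List.pySetD (PySem.List.pyGetD M (i-1) []) (j-1) true)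
      else M) M) M_dist0
  let M_edges0 : List (List Bool) :=
    (PySem.List.pyRange 0 n 1).map (fun _ => (PySem.List.pyRange 0 n 1).map (fun _ => false))
  let M_edges := A.foldl (fun M a =>
    let s1 := a.1 - 1
    let s2 := a.2 - 1
    let M1 := PySem.List.pySetD M s1 (PySem.List.pySetD (PySem.List.pyGetD M s1 []) s2 true)
    PySem.List.pySetD M1 s2 (PySem.List.pySetD (PySem.List.pyGetD M1 s2 []) s1 true)) M_edges0
  (M_edges, M_dist)

-- ===== PORT B =====
def pre_treatment_alt (n : Int) (A : List (Int × Int)) (k : Int) : List (List Bool) × List (List Bool) :=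
  let pattern : List Bool := (PySem.List.pyRange 0 n 1).map (fun d => decide (min d (n - d) ≤ k))
  let M_dist := (PySem.List.pyRange 0 n 1).map (fun i =>
    PySem.List.slice pattern (some (n - i)) none ++ PySem.List.slice pattern none (some (n - i)))
  let arcs : List (Int × Int) := A.flatMap (fun a => [(a.1 - 1, a.2 - 1), (a.2 - 1, a.1 - 1)])
  let M_edges0 : List (List Bool) :=
    (PySem.List.pyRange 0 n 1).map (fun _ => List.replicate n.toNat false)
  let M_edges := arcs.foldl (fun M p =>
    PySem.List.pySetD M p.1 (PySem.List.pySetD (PySem.List.pyGetD M p.1 []) p.2 true)) M_edges0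
  (M_edges, M_dist)

-- ===== PRECONDITION & SPEC =====
-- Pre_ excludes exactly the inputs on which A raises IndexError: an edge endpoint a with
-- a-1 outside the Python index range [-n, n-1] of the n×n matrix.
def Pre_pre_treatment (n : Int) (A : List (Int × Int)) (k : Int) : Prop :=
  ∀ p ∈ A, -n ≤ p.1 - 1 ∧ p.1 - 1 < n ∧ -n ≤ p.2 - 1 ∧ p.2 - 1 < n
instance (n : Int) (A : List (Int × Int)) (k : Int) : Decidable (Pre_pre_treatment n A k) := by unfold Pre_pre_treatment; infer_instance
def pvWitness_pre_treatment : Int × (List (Int × Int)) × Int := (4, [(1, 2), (3, 4)], 1)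
def Spec_pre_treatment (n : Int) (A : List (Int × Int)) (k : Int) (out : List (List Bool) × List (List Bool)) : Prop := out = pre_treatment_alt n A k
instance (n : Int) (A : List (Int × Int)) (k : Int) (out : List (List Bool) × List (List Bool)) : Decidable (Spec_pre_treatment n A k out) := by unfold Spec_pre_treatment; infer_instance

-- ===== CLAIM (what is proved, stated in full; the proofs are below) =====
def Claim_equal_pre_treatment : Prop := ∀ (n : Int) (A : List (Int × Int)) (k : Int), Dom_pre_treatment n A k → Pre_pre_treatment n A k → Spec_pre_treatment n A k (pre_treatment n A k)

-- ===== LEMMAS AND PROOFS =====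

-- proof-side names for the loop bodies of port A's M_dist construction (definitionally
-- equal to the lambdas in `pre_treatment`)
def pvRowStep (n k i : Int) (r : List Bool) (j : Int) : List Bool :=
  if min |i - j| (n - |i - j|) ≤ k then PySem.List.pySetD r (j-1) true else r

def pvInner (n k i : Int) (M : List (List Bool)) (j : Int) : List (List Bool) :=
  if min |i - j| (n - |i - j|) ≤ k then
    PySem.List.pySetD M (i-1) (PySem.List.pySetD (PySem.List.pyGetD M (i-1) []) (j-1) true)
  else M

def pvOuter (n k : Int) (M : List (List Bool)) (i : Int) : List (List Bool) :=
  (PySem.List.pyRange 1 (n+1) 1).foldl (pvInner n k i) M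

-- one-write arc step (B's loop body)
def pvArcStep (M : List (List Bool)) (p : Int × Int) : List (List Bool) :=
  PySem.List.pySetD M p.1 (PySem.List.pySetD (PySem.List.pyGetD M p.1 []) p.2 true)

-- A's per-edge double write equals B's fold over the flattened arc list
theorem pvArcs_eq (A : List (Int × Int)) :
    ∀ (M : List (List Bool)),
      A.foldl (fun M a => pvArcStep (pvArcStep M (a.1 - 1, a.2 - 1)) (a.2 - 1, a.1 - 1)) M
        = (A.flatMap (fun a => [(a.1 - 1, a.2 - 1), (a.2 - 1, a.1 - 1)])).foldl pvArcStep M := by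
  induction A with
  | nil => intro M; rfl
  | cons a as ih =>
      intro M
      rw [List.foldl_cons, List.flatMap_cons, List.foldl_append, List.foldl_cons,
          List.foldl_cons, List.foldl_nil, ih]

theorem pvRowStep_length (n k i : Int) (js : List Int) (r : List Bool) :
    (js.foldl (pvRowStep n k i) r).length = r.length := by
  induction js generalizing r with
  | nil => rfl
  | cons j js ih =>
      rw [List.foldl_cons, ih]
      unfold pvRowStep
      split <;> simp [PySem.List.length_pySetD]

-- the inner j-loop of A only touches row i-1: it replaces that row by the row fold
theorem pvInner_foldl (n k : Int) (js : List Int) (i : Int) (hi : 1 ≤ i) :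
    ∀ (M : List (List Bool)), (i-1).toNat < M.length →
      js.foldl (pvInner n k i) M
        = M.set (i-1).toNat (js.foldl (pvRowStep n k i) (M.getD (i-1).toNat [])) := by
  induction js with
  | nil =>
      intro M ht
      simp only [List.foldl_nil]
      rw [List.getD_eq_getElem _ _ ht, List.set_getElem_self ht]
  | cons j js ih =>
      intro M ht
      have h0 : (0:Int) ≤ i - 1 := by omega
      have hlt : i - 1 < (M.length : Int) := by omega
      have hget : PySem.List.pyGetD M (i-1) [] = M.getD (i-1).toNat [] := by
        rw [PySem.List.pyGetD_eq_getElem M [] h0 hlt, List.getD_eq_getElem _ _ ht]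
      rw [List.foldl_cons, List.foldl_cons]
      by_cases hc : min |i - j| (n - |i - j|) ≤ k
      · have h1 : pvInner n k i M j
            = M.set (i-1).toNat (PySem.List.pySetD (M.getD (i-1).toNat []) (j-1) true) := by
          unfold pvInner
          rw [if_pos hc, hget, PySem.List.pySetD_of_nonneg M _ h0]
        have h2 : pvRowStep n k i (M.getD (i-1).toNat []) j
            = PySem.List.pySetD (M.getD (i-1).toNat []) (j-1) true := by
          unfold pvRowStep; rw [if_pos hc]
        rw [h1, h2, ih _ (by simpa using ht)]
        rw [List.set_set, List.getD_eq_getElem _ _ (by simpa using ht),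
            List.getElem_set_self (by simpa using ht)]
      · have h1 : pvInner n k i M j = M := by unfold pvInner; rw [if_neg hc]
        have h2 : pvRowStep n k i (M.getD (i-1).toNat []) j = M.getD (i-1).toNat [] := by
          unfold pvRowStep; rw [if_neg hc]
        rw [h1, h2, ih M ht]

-- entrywise description of the row fold over j = 1..m
theorem pvRow_getElem (n k i : Int) (m : Nat) (r : List Bool) (u : Nat) (hu : u < r.length) :
    ((PySem.List.pyRange 1 ((m:Int)+1) 1).foldl (pvRowStep n k i) r)[u]?
      = if u < m ∧ min |i - ((u:Int)+1)| (n - |i - ((u:Int)+1)|) ≤ k then some true else r[u]? := by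
  induction m with
  | zero =>
      rw [PySem.List.pyRange_one_eq_nil (by omega)]
      simp
  | succ m ih =>
      have hcast : ((m+1 : Nat) : Int) + 1 = ((m:Int) + 1) + 1 := by push_cast; ring
      rw [hcast, PySem.List.pyRange_one_succ_right (by omega), List.foldl_append]
      rw [List.foldl_cons, List.foldl_nil]
      set prev := (PySem.List.pyRange 1 ((m:Int)+1) 1).foldl (pvRowStep n k i) r with hprev
      have hlen : prev.length = r.length := pvRowStep_length n k i _ r
      by_cases hc : min |i - ((m:Int)+1)| (n - |i - ((m:Int)+1)|) ≤ k
      · have hstep : pvRowStep n k i prev ((m:Int)+1) = prev.set m true := by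
          unfold pvRowStep
          rw [if_pos hc, show ((m:Int)+1) - 1 = ((m:Nat):Int) by ring,
              PySem.List.pySetD_natCast]
        rw [hstep, List.getElem?_set, hlen]
        by_cases hum : m = u
        · subst hum
          rw [if_pos rfl, if_pos hu, if_pos ⟨by omega, hc⟩]
        · rw [if_neg hum, ih]
          have hiff : (u < m + 1 ∧ min |i - ((u:Int)+1)| (n - |i - ((u:Int)+1)|) ≤ k)
               ↔ (u < m ∧ min |i - ((u:Int)+1)| (n - |i - ((u:Int)+1)|) ≤ k) :=
            ⟨fun h => ⟨by omega, h.2⟩, fun h => ⟨by omega, h.2⟩⟩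
          rw [if_congr hiff rfl rfl]
      · have hstep : pvRowStep n k i prev ((m:Int)+1) = prev := by
          unfold pvRowStep; rw [if_neg hc]
        rw [hstep, ih]
        by_cases hum : u = m
        · subst hum
          rw [if_neg (fun h => absurd h.1 (by omega)), if_neg (fun h => hc h.2)]
        · have hiff : (u < m + 1 ∧ min |i - ((u:Int)+1)| (n - |i - ((u:Int)+1)|) ≤ k)
               ↔ (u < m ∧ min |i - ((u:Int)+1)| (n - |i - ((u:Int)+1)|) ≤ k) :=
            ⟨fun h => ⟨by omega, h.2⟩, fun h => ⟨by omega, h.2⟩⟩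
          rw [if_congr hiff rfl rfl]

theorem pvInner_length (n k i : Int) (M : List (List Bool)) (j : Int) :
    (pvInner n k i M j).length = M.length := by
  unfold pvInner; split <;> simp [PySem.List.length_pySetD]

theorem pvInner_foldl_length (n k i : Int) (js : List Int) (M : List (List Bool)) :
    (js.foldl (pvInner n k i) M).length = M.length := by
  induction js generalizing M with
  | nil => rfl
  | cons j js ih => rw [List.foldl_cons, ih, pvInner_length]

theorem pvOuter_foldl_length (n k : Int) (js : List Int) (M : List (List Bool)) :
    (js.foldl (pvOuter n k) M).length = M.length := by
  induction js generalizing M with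
  | nil => rfl
  | cons j js ih => rw [List.foldl_cons, ih]; unfold pvOuter; rw [pvInner_foldl_length]

-- the outer i-loop: row u of the result is the row fold applied to row u of the start
theorem pvOuter_foldl (n k : Int) (m : Nat) (M : List (List Bool)) :
    m ≤ M.length → ∀ u : Nat, u < M.length →
    ((PySem.List.pyRange 1 ((m:Int)+1) 1).foldl (pvOuter n k) M)[u]?
      = if u < m then
          some ((PySem.List.pyRange 1 (n+1) 1).foldl (pvRowStep n k ((u:Int)+1)) (M.getD u []))
        else M[u]? := by
  induction m with
  | zero =>
      intro _ u hu
      rw [PySem.List.pyRange_one_eq_nil (by omega)]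
      simp
  | succ m ih =>
      intro hm u hu
      have hcast : ((m+1 : Nat) : Int) + 1 = ((m:Int) + 1) + 1 := by push_cast; ring
      rw [hcast, PySem.List.pyRange_one_succ_right (by omega), List.foldl_append]
      rw [List.foldl_cons, List.foldl_nil]
      set prev := (PySem.List.pyRange 1 ((m:Int)+1) 1).foldl (pvOuter n k) M with hprev
      have hlen : prev.length = M.length := pvOuter_foldl_length n k _ M
      have htm : (((m:Int)+1) - 1).toNat = m := by omega
      have houter : pvOuter n k prev ((m:Int)+1)
          = prev.set m ((PySem.List.pyRange 1 (n+1) 1).foldl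
              (pvRowStep n k ((m:Int)+1)) (prev.getD m [])) := by
        unfold pvOuter
        rw [pvInner_foldl n k _ _ (by omega) prev (by omega), htm]
      have hgetm : prev.getD m [] = M.getD m [] := by
        rw [List.getD_eq_getElem?_getD, List.getD_eq_getElem?_getD, hprev,
            ih (by omega) m (by omega), if_neg (by omega)]
      rw [houter, hgetm, List.getElem?_set, hlen]
      by_cases hum : m = u
      · subst hum
        rw [if_pos rfl, if_pos hu, if_pos (by omega)]
      · rw [if_neg hum, ih (by omega) u hu]
        by_cases hult : u < m
        · rw [if_pos hult, if_pos (by omega)]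
        · rw [if_neg hult, if_neg (by omega)]

-- single row: A's row fold on the all-false row equals B's rotated band pattern row
theorem pv_row_eq (n k : Int) (hn : 0 < n) (t : Nat) (ht : t < n.toNat) :
    (PySem.List.pyRange 1 (n+1) 1).foldl (pvRowStep n k ((t:Int)+1)) (List.replicate n.toNat false)
      = PySem.List.slice ((PySem.List.pyRange 0 n 1).map (fun d => decide (min d (n - d) ≤ k)))
          (some (n - (t:Int))) none
        ++ PySem.List.slice ((PySem.List.pyRange 0 n 1).map (fun d => decide (min d (n - d) ≤ k)))
          none (some (n - (t:Int))) := by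
  set N := n.toNat with hNdef
  have hN : ((N:Nat) : Int) = n := by omega
  set pat := (PySem.List.pyRange 0 n 1).map (fun d => decide (min d (n - d) ≤ k)) with hpat
  have hpatlen : pat.length = N := by
    rw [hpat, List.length_map, PySem.List.length_pyRange_one]; omega
  have hpatget : ∀ (d : Nat), d < N → pat[d]? = some (decide (min (d:Int) (n - d) ≤ k)) := by
    intro d hd
    rw [hpat, ← hN, PySem.List.getElem?_map_pyRange_zero _ N d hd]
  have hfrom : PySem.List.slice pat (some (n - (t:Int))) none = pat.drop (N - t) := by
    rw [PySem.List.slice_from pat (by omega)]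
    congr 1; omega
  have hto : PySem.List.slice pat none (some (n - (t:Int))) = pat.take (N - t) := by
    rw [PySem.List.slice_to pat (by omega)]
    congr 1; omega
  rw [hfrom, hto]
  have hdroplen : (pat.drop (N - t)).length = t := by rw [List.length_drop, hpatlen]; omega
  apply List.ext_getElem?
  intro u
  by_cases hu : u < N
  · have hnsucc : n + 1 = ((N:Nat):Int) + 1 := by omega
    rw [hnsucc, pvRow_getElem n k _ N _ u (by simpa using hu)]
    have hrep : (List.replicate N false)[u]? = some false := by
      rw [List.getElem?_replicate, if_pos hu]
    rw [hrep]
    by_cases hut : u < t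
    · -- left part of the rotation: pattern index N - t + u
      rw [List.getElem?_append_left (by omega), List.getElem?_drop,
          hpatget ((N - t) + u) (by omega)]
      have habs : |((t:Int)+1) - ((u:Int)+1)| = (t:Int) - u := by
        rw [abs_of_nonneg (by omega)]; ring
      have hidx : ((((N - t) + u : Nat)):Int) = n - ((t:Int) - (u:Int)) := by omega
      have hcond : (min |((t:Int)+1) - ((u:Int)+1)| (n - |((t:Int)+1) - ((u:Int)+1)|) ≤ k)
          ↔ (min ((((N - t) + u : Nat)):Int) (n - (((N - t) + u : Nat):Int)) ≤ k) := by
        rw [habs, hidx, show n - (n - ((t:Int) - (u:Int))) = (t:Int) - (u:Int) from by ring,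
            min_comm]
      by_cases hc : min ((((N - t) + u : Nat)):Int) (n - (((N - t) + u : Nat):Int)) ≤ k
      · rw [if_pos ⟨hu, hcond.mpr hc⟩, decide_eq_true hc]
      · rw [if_neg (fun h => hc (hcond.mp h.2)), decide_eq_false hc]
    · -- right part of the rotation: pattern index u - t
      rw [List.getElem?_append_right (by omega), hdroplen, List.getElem?_take]
      rw [if_pos (show u - t < N - t by omega), hpatget (u - t) (by omega)]
      have habs : |((t:Int)+1) - ((u:Int)+1)| = ((u - t : Nat):Int) := by
        rw [abs_of_nonpos (by omega)]; omega
      have hcond : (min |((t:Int)+1) - ((u:Int)+1)| (n - |((t:Int)+1) - ((u:Int)+1)|) ≤ k)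
          ↔ (min (((u - t : Nat)):Int) (n - ((u - t : Nat):Int)) ≤ k) := by
        rw [habs]
      by_cases hc : min (((u - t : Nat)):Int) (n - ((u - t : Nat):Int)) ≤ k
      · rw [if_pos ⟨hu, hcond.mpr hc⟩, decide_eq_true hc]
      · rw [if_neg (fun h => hc (hcond.mp h.2)), decide_eq_false hc]
  · -- both sides are none beyond index N
    have h1 : ((PySem.List.pyRange 1 (n+1) 1).foldl (pvRowStep n k ((t:Int)+1))
        (List.replicate N false)).length = N := by
      rw [pvRowStep_length]; simp
    rw [List.getElem?_eq_none (by omega), List.getElem?_eq_none (by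
      rw [List.length_append, hdroplen, List.length_take, hpatlen]; omega)]

-- full M_dist: A's double loop equals B's map of rotated pattern rows
theorem pv_dist (n k : Int) (hn : 0 < n) :
    (PySem.List.pyRange 1 (n+1) 1).foldl (pvOuter n k)
        ((PySem.List.pyRange 0 n 1).map (fun _ => (PySem.List.pyRange 0 n 1).map (fun _ => false)))
      = (PySem.List.pyRange 0 n 1).map (fun i =>
          PySem.List.slice ((PySem.List.pyRange 0 n 1).map (fun d => decide (min d (n - d) ≤ k)))
            (some (n - i)) none
          ++ PySem.List.slice ((PySem.List.pyRange 0 n 1).map (fun d => decide (min d (n - d) ≤ k)))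
            none (some (n - i))) := by
  set N := n.toNat with hNdef
  have hN : ((N:Nat) : Int) = n := by omega
  have hrow0 : (PySem.List.pyRange 0 n 1).map (fun _ : Int => false) = List.replicate N false := by
    rw [List.map_const', PySem.List.length_pyRange_one]
    congr 1; omega
  set M0 := (PySem.List.pyRange 0 n 1).map
      (fun _ => (PySem.List.pyRange 0 n 1).map (fun _ : Int => false)) with hM0
  have hM0len : M0.length = N := by
    rw [hM0, List.length_map, PySem.List.length_pyRange_one]; omega
  have hM0get : ∀ u : Nat, u < N → M0[u]? = some (List.replicate N false) := by
    intro u hu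
    rw [hM0, ← hN, PySem.List.getElem?_map_pyRange_zero _ N u hu, hN, hrow0]
  apply List.ext_getElem?
  intro u
  by_cases hu : u < N
  · have hnsucc : n + 1 = ((N:Nat):Int) + 1 := by omega
    rw [hnsucc, pvOuter_foldl n k N M0 (by omega) u (by omega), if_pos hu]
    have hgetD : M0.getD u [] = List.replicate N false := by
      rw [List.getD_eq_getElem?_getD, hM0get u hu]; rfl
    rw [hgetD]
    have hRHSget : ((PySem.List.pyRange 0 n 1).map (fun i =>
          PySem.List.slice ((PySem.List.pyRange 0 n 1).map (fun d => decide (min d (n - d) ≤ k)))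
            (some (n - i)) none
          ++ PySem.List.slice ((PySem.List.pyRange 0 n 1).map (fun d => decide (min d (n - d) ≤ k)))
            none (some (n - i))))[u]?
        = some (PySem.List.slice ((PySem.List.pyRange 0 n 1).map (fun d => decide (min d (n - d) ≤ k)))
            (some (n - (u:Int))) none
          ++ PySem.List.slice ((PySem.List.pyRange 0 n 1).map (fun d => decide (min d (n - d) ≤ k)))
            none (some (n - (u:Int)))) := by
      conv_lhs => rw [← hN]
      rw [PySem.List.getElem?_map_pyRange_zero _ N u hu, hN]
    rw [hRHSget]
    exact congrArg some (pv_row_eq n k hn u (by omega))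
  · rw [List.getElem?_eq_none (by rw [pvOuter_foldl_length]; omega),
        List.getElem?_eq_none (by rw [List.length_map, PySem.List.length_pyRange_one]; omega)]

-- ===== VERDICT (by name: the statement is the Claim_ definition above) =====
theorem pre_treatment_spec : Claim_equal_pre_treatment := by
  intro n A k _ hpre
  unfold Spec_pre_treatment
  simp only [pre_treatment, pre_treatment_alt]
  by_cases hn : n ≤ 0
  · have hA : A = [] := by
      cases A with
      | nil => rfl
      | cons p ps =>
          have := hpre p (by simp)
          omega
    subst hA
    have h1 : PySem.List.pyRange 0 n 1 = [] := PySem.List.pyRange_one_eq_nil (by omega)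
    have h2 : PySem.List.pyRange 1 (n+1) 1 = [] := PySem.List.pyRange_one_eq_nil (by omega)
    simp [h1, h2]
  · have hn : 0 < n := by omega
    have hrow0 : (PySem.List.pyRange 0 n 1).map (fun _ : Int => false)
        = List.replicate n.toNat false := by
      rw [List.map_const', PySem.List.length_pyRange_one]
      congr 1; omega
    rw [Prod.mk.injEq]
    constructor
    · simp only [hrow0]
      exact pvArcs_eq A _
    · exact pv_dist n k hn
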